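-- pv_equiv track=rewrite | github.com/MrBrantCode/unitest_baseline | mut_generate/mist_train_cf/cf_51062/solution.py | palindrome_counter
-- ===== SOURCE A (Python) =====
-- def palindrome_counter(input_string):
--     # Make the string lower case and strip all non-alphanumeric characters
--     normalized_string = ''.join(e.lower() for e in input_string if e.isalnum())
--
--     # Check if the string is a palindrome
--     is_palindrome = normalized_string == normalized_string[::-1]
--
--     # Initialize counter for character pairs
--     char_pair_counter = 0
--
--     # Create counter of character frequencies in the string
--     from collections import Counter
--     freq_counter = Counter(normalized_string)
--
--     # Check for character pairs
--     for key in freq_counter: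
--         char_pair_counter += freq_counter[key] // 2
--
--     return is_palindrome, char_pair_counter
-- ===== SOURCE B (Python) =====
-- def palindrome_counter(input_string):
--     # One pass: normalize, and count pairs with a set of unmatched characters.
--     chars = []
--     unmatched = set()
--     pairs = 0
--     for ch in input_string:
--         if ch.isalnum():
--             c = ch.lower()
--             chars.append(c)
--             if c in unmatched:
--                 unmatched.discard(c)
--                 pairs += 1
--             else:
--                 unmatched.add(c)
--     return chars == chars[::-1], pairs
-- ===== Notes on version B (the rewrite author's own statement) =====
-- stated objective: alternative
-- what changed: Replaces the join + Counter + loop-over-distinct-keys pipeline by a single pass over the input that normalizes each character and counts pairs on the fly with a set of unmatched characters (toggle in/out, increment on match), so the frequency dictionary and the second loop disappear.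
import Mathlib
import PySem

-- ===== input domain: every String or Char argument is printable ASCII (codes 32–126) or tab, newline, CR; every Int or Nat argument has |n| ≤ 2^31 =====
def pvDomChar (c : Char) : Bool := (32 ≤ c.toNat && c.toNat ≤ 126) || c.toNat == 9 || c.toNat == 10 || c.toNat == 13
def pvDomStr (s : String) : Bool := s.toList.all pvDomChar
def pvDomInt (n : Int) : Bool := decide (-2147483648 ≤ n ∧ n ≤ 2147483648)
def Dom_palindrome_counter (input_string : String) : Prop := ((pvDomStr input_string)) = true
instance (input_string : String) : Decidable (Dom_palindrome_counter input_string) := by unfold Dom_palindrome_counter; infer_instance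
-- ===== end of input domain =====

-- B replaces A's join + Counter + loop over distinct keys by one pass with a set of
-- unmatched characters (objective: alternative decomposition, same asymptotic cost).

-- ===== PORT A =====
def palindrome_counter (input_string : String) : Bool × Int :=
  -- normalized_string = ''.join(e.lower() for e in input_string if e.isalnum())
  let normalized : List Char :=
    (input_string.toList.filter PySem.Chars.isalnum).map PySem.Chars.lowerChar
  -- is_palindrome = normalized_string == normalized_string[::-1]
  let is_palindrome : Bool :=
    normalized == (PySem.List.slice? normalized none none (-1)).getD []
  -- freq_counter = Counter(normalized_string)
  let freq_counter : PySem.Dict Char Int := PySem.Dict.counter normalized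
  -- for key in freq_counter: char_pair_counter += freq_counter[key] // 2
  let char_pair_counter : Int :=
    freq_counter.keys.foldl
      (fun acc k => acc + PySem.Int.floordiv (freq_counter.getD k 0) 2) 0
  (is_palindrome, char_pair_counter)

-- ===== PORT B =====
def pvStepB (st : List Char × PySem.Set Char × Int) (ch : Char) :
    List Char × PySem.Set Char × Int :=
  if PySem.Chars.isalnum ch then
    let c := PySem.Chars.lowerChar ch
    let chars := st.1 ++ [c]
    if PySem.Set.contains st.2.1 c then (chars, PySem.Set.discard st.2.1 c, st.2.2 + 1)
    else (chars, PySem.Set.add st.2.1 c, st.2.2)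
  else st

def palindrome_counter_alt (input_string : String) : Bool × Int :=
  let r := input_string.toList.foldl pvStepB ([], PySem.Set.empty, 0)
  (r.1 == (PySem.List.slice? r.1 none none (-1)).getD [], r.2.2)

-- ===== PRECONDITION & SPEC =====
def Spec_palindrome_counter (input_string : String) (out : Bool × Int) : Prop := out = palindrome_counter_alt input_string
instance (input_string : String) (out : Bool × Int) : Decidable (Spec_palindrome_counter input_string out) := by unfold Spec_palindrome_counter; infer_instance

-- ===== CLAIM (what is proved, stated in full; the proofs are below) =====
def Claim_equal_palindrome_counter : Prop := ∀ (input_string : String), Dom_palindrome_counter input_string → Spec_palindrome_counter input_string (palindrome_counter input_string)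

-- ===== LEMMAS AND PROOFS =====

-- pair count spec: sum over distinct characters of count // 2
def pvPN (m : List Char) : Nat := ∑ x ∈ m.toFinset, m.count x / 2

lemma pvCount_append (m : List Char) (c x : Char) :
    (m ++ [c]).count x = m.count x + (if x = c then 1 else 0) := by
  rw [List.count_append]
  by_cases h : x = c
  · subst h; simp
  · simp [h, Ne.symm h]

lemma pvPN_append (m : List Char) (c : Char) :
    pvPN (m ++ [c]) = pvPN m + (if Odd (m.count c) then 1 else 0) := by
  unfold pvPN
  have htf : (m ++ [c]).toFinset = insert c m.toFinset := by
    rw [List.toFinset_append]; simp [Finset.union_singleton]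
  rw [htf]
  have hterm : (m ++ [c]).count c / 2 = m.count c / 2 + (if Odd (m.count c) then 1 else 0) := by
    rw [pvCount_append]; simp only [Nat.odd_iff]
    split_ifs with h <;> omega
  by_cases hm : c ∈ m.toFinset
  · rw [Finset.insert_eq_self.mpr hm]
    rw [← Finset.sum_erase_add _ _ hm, ← Finset.sum_erase_add _ (fun x => m.count x / 2) hm]
    rw [hterm]
    have : ∑ x ∈ m.toFinset.erase c, (m ++ [c]).count x / 2
         = ∑ x ∈ m.toFinset.erase c, m.count x / 2 := by
      refine Finset.sum_congr rfl fun x hx => ?_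
      rw [pvCount_append, if_neg (Finset.ne_of_mem_erase hx)]
      omega
    omega
  · have hc0 : m.count c = 0 :=
      List.count_eq_zero_of_not_mem (fun h => hm (List.mem_toFinset.mpr h))
    rw [Finset.sum_insert hm]
    have : ∑ x ∈ m.toFinset, (m ++ [c]).count x / 2
         = ∑ x ∈ m.toFinset, m.count x / 2 := by
      refine Finset.sum_congr rfl fun x hx => ?_
      rw [pvCount_append, if_neg (fun (h : x = c) => hm (h ▸ hx))]
      omega
    rw [this, hterm, hc0]
    simp [Nat.odd_iff]

-- the toggle step over the already-normalized list
def pvStepN (st : List Char × PySem.Set Char × Int) (c : Char) :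
    List Char × PySem.Set Char × Int :=
  let chars := st.1 ++ [c]
  if PySem.Set.contains st.2.1 c then (chars, PySem.Set.discard st.2.1 c, st.2.2 + 1)
  else (chars, PySem.Set.add st.2.1 c, st.2.2)

lemma pvFold_filter (l : List Char) (st : List Char × PySem.Set Char × Int) :
    l.foldl pvStepB st =
      ((l.filter PySem.Chars.isalnum).map PySem.Chars.lowerChar).foldl pvStepN st := by
  induction l generalizing st with
  | nil => rfl
  | cons a l ih =>
    by_cases h : PySem.Chars.isalnum a = true
    · simp [h, pvStepB, pvStepN, ih]
    · simp only [Bool.not_eq_true] at h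
      simp [h, pvStepB, ih]

lemma pvToggle_inv (m : List Char) :
    ∃ S : PySem.Set Char,
      m.foldl pvStepN ([], PySem.Set.empty, 0) = (m, S, (pvPN m : Int)) ∧
      (∀ c : Char, c ∈ S ↔ Odd (m.count c)) := by
  induction m using List.reverseRecOn with
  | nil => exact ⟨[], by simp [pvPN], by simp⟩
  | append_singleton m c ih =>
    obtain ⟨S, hfold, hmem⟩ := ih
    rw [List.foldl_append, hfold]
    by_cases hodd : Odd (m.count c)
    · refine ⟨PySem.Set.discard S c, ?_, ?_⟩
      · have hcS : PySem.Set.contains S c = true :=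
          (PySem.Set.contains_iff S c).mpr ((hmem c).mpr hodd)
        simp only [List.foldl_cons, List.foldl_nil, pvStepN, hcS, if_pos]
        rw [pvPN_append, if_pos hodd]
        push_cast; ring_nf
      · intro y
        rw [PySem.Set.mem_discard, hmem, pvCount_append]
        by_cases hy : y = c
        · subst hy
          rw [Nat.odd_iff] at hodd
          simp [Nat.odd_iff]
          omega
        · simp [hy]
    · refine ⟨PySem.Set.add S c, ?_, ?_⟩
      · have hcS : PySem.Set.contains S c = false := by
          rcases h : PySem.Set.contains S c with _ | _
          · rfl
          · exact absurd ((hmem c).mp ((PySem.Set.contains_iff S c).mp h)) hodd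
        simp only [List.foldl_cons, List.foldl_nil, pvStepN, hcS, Bool.false_eq_true]
        rw [pvPN_append, if_neg hodd]
        simp
      · intro y
        rw [PySem.Set.mem_add, hmem, pvCount_append]
        by_cases hy : y = c
        · subst hy
          rw [Nat.odd_iff] at hodd
          simp [Nat.odd_iff]
          omega
        · simp [hy]

lemma pvA_pairs (n : List Char) :
    (PySem.Dict.counter n).keys.foldl
      (fun acc k => acc + PySem.Int.floordiv ((PySem.Dict.counter n).getD k 0) 2) 0
      = (pvPN n : Int) := by
  simp only [PySem.Dict.getD_counter]
  rw [PySem.Dict.keys_counter,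
      PySem.List.foldl_add (g := fun k => PySem.Int.floordiv ((n.count k : Nat) : Int) 2)]
  simp only [zero_add]
  unfold pvPN
  rw [← PySem.List.dedup_eq_ofList,
      ← List.sum_toFinset _ (PySem.List.nodup_dedup n)]
  have htf : (PySem.List.dedup n).toFinset = n.toFinset := by
    ext x; simp
  rw [htf]
  rw [Finset.sum_congr rfl (fun x _ => by
    exact_mod_cast PySem.Int.floordiv_natCast (n.count x) 2)]
  push_cast
  rfl

-- ===== VERDICT (by name: the statement is the Claim_ definition above) =====
theorem palindrome_counter_spec : Claim_equal_palindrome_counter := by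
  intro s _
  unfold Spec_palindrome_counter palindrome_counter palindrome_counter_alt
  rw [pvFold_filter]
  obtain ⟨S, hfold, -⟩ := pvToggle_inv ((s.toList.filter PySem.Chars.isalnum).map PySem.Chars.lowerChar)
  simp only [hfold, pvA_pairs]
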